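-- pv_equiv track=rewrite | github.com/helpfuldolphin/mathledger | experiments/u2/replay_safety.py | _build_compact_reason_summary
-- ===== SOURCE A (Python) =====
-- from typing import Any, Dict, List, Optional, Tuple
--
-- def _build_compact_reason_summary(reasons: List[str], max_reasons: int = 3) -> str:
--     """Build a compact summary of reasons for evidence display.
--
--     Args:
--         reasons: List of prefixed reason strings.
--         max_reasons: Maximum number of reasons to include.
--
--     Returns:
--         Compact summary string.
--     """
--     if not reasons:
--         return "All checks passed"
--
--     # Filter to most important reasons (CONFLICT > Safety > Radar)
--     conflict_reasons = [r for r in reasons if "[CONFLICT]" in r]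
--     safety_reasons = [r for r in reasons if "[Safety]" in r and "[CONFLICT]" not in r]
--     radar_reasons = [r for r in reasons if "[Radar]" in r and "[CONFLICT]" not in r]
--
--     # Prioritize: conflicts first, then safety, then radar
--     prioritized = conflict_reasons + safety_reasons + radar_reasons
--     selected = prioritized[:max_reasons]
--
--     if len(prioritized) > max_reasons:
--         remaining = len(prioritized) - max_reasons
--         return "; ".join(selected) + f" (+{remaining} more)"
--
--     return "; ".join(selected) if selected else "All checks passed"
-- ===== SOURCE B (Python) =====
-- def _build_compact_reason_summary(reasons, max_reasons=3):
--     """Single pass tagging each reason with a priority, then one stable sort."""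
--     if not reasons:
--         return "All checks passed"
--
--     tagged = []
--     for r in reasons:
--         if "[CONFLICT]" in r:
--             tagged.append((0, r))
--         else:
--             if "[Safety]" in r:
--                 tagged.append((1, r))
--             if "[Radar]" in r:
--                 tagged.append((2, r))
--     tagged.sort(key=lambda t: t[0])  # stable: original order kept within a priority
--
--     prioritized = [r for _, r in tagged]
--     selected = prioritized[:max_reasons]
--
--     if len(prioritized) > max_reasons:
--         return "; ".join(selected) + f" (+{len(prioritized) - max_reasons} more)"
--
--     return "; ".join(selected) if selected else "All checks passed"
-- ===== Notes on version B (the rewrite author's own statement) =====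
-- stated objective: alternative
-- what changed: Replaces A's three separate filter passes and list concatenation by a single tagging pass that assigns each reason a priority (0 conflict, 1 safety, 2 radar; a non-conflict reason with both tags yields two entries) followed by one stable sort on the priority key.
import Mathlib
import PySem

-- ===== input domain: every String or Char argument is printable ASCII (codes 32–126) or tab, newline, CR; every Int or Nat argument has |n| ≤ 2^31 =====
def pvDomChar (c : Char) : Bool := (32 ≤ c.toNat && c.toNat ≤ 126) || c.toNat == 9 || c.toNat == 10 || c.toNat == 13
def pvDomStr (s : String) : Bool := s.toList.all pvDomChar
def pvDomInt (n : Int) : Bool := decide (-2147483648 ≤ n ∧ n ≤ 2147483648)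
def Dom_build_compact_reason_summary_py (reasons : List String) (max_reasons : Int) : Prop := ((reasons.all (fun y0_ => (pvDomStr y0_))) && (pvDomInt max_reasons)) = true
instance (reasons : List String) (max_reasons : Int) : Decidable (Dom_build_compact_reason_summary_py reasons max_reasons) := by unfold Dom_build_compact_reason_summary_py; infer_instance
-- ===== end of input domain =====

-- B replaces A's three separate filter passes by one tagging pass plus one stable sort by priority (objective: alternative/idiomatic).

-- ===== PORT A =====
def build_compact_reason_summary_py (reasons : List String) (max_reasons : Int) : String :=
  if reasons = [] then "All checks passed"
  else
    let conflict_reasons := reasons.filter (fun r => PySem.Str.isIn "[CONFLICT]" r)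
    let safety_reasons := reasons.filter (fun r => PySem.Str.isIn "[Safety]" r && !PySem.Str.isIn "[CONFLICT]" r)
    let radar_reasons := reasons.filter (fun r => PySem.Str.isIn "[Radar]" r && !PySem.Str.isIn "[CONFLICT]" r)
    let prioritized := conflict_reasons ++ safety_reasons ++ radar_reasons
    let selected := PySem.List.slice prioritized none (some max_reasons)
    if (prioritized.length : Int) > max_reasons then
      PySem.Str.join "; " selected ++ " (+" ++ PySem.Int.toStr ((prioritized.length : Int) - max_reasons) ++ " more)"
    else if selected ≠ [] then PySem.Str.join "; " selected
    else "All checks passed"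

-- ===== PORT B =====
def build_compact_reason_summary_py_alt (reasons : List String) (max_reasons : Int) : String :=
  if reasons = [] then "All checks passed"
  else
    let tagged := reasons.foldl (fun acc r =>
      if PySem.Str.isIn "[CONFLICT]" r then acc ++ [((0 : Int), r)]
      else
        let acc1 := if PySem.Str.isIn "[Safety]" r then acc ++ [((1 : Int), r)] else acc
        if PySem.Str.isIn "[Radar]" r then acc1 ++ [((2 : Int), r)] else acc1) []
    let sortedTagged := PySem.List.sorted tagged (fun t => t.1)
    let prioritized := sortedTagged.map (fun t => t.2)
    let selected := PySem.List.slice prioritized none (some max_reasons)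
    if (prioritized.length : Int) > max_reasons then
      PySem.Str.join "; " selected ++ " (+" ++ PySem.Int.toStr ((prioritized.length : Int) - max_reasons) ++ " more)"
    else if selected ≠ [] then PySem.Str.join "; " selected
    else "All checks passed"

-- ===== PRECONDITION & SPEC =====
def Spec_build_compact_reason_summary_py (reasons : List String) (max_reasons : Int) (out : String) : Prop := out = build_compact_reason_summary_py_alt reasons max_reasons
instance (reasons : List String) (max_reasons : Int) (out : String) : Decidable (Spec_build_compact_reason_summary_py reasons max_reasons out) := by unfold Spec_build_compact_reason_summary_py; infer_instance

-- ===== CLAIM (what is proved, stated in full; the proofs are below) =====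
def Claim_equal_build_compact_reason_summary_py : Prop := ∀ (reasons : List String) (max_reasons : Int), Dom_build_compact_reason_summary_py reasons max_reasons → Spec_build_compact_reason_summary_py reasons max_reasons (build_compact_reason_summary_py reasons max_reasons)

-- ===== LEMMAS AND PROOFS =====

-- what one iteration of B's tagging loop appends for a reason r
def pvTagOne (r : String) : List (Int × String) :=
  (if PySem.Str.isIn "[CONFLICT]" r then [((0 : Int), r)] else []) ++
  (if PySem.Str.isIn "[Safety]" r && !PySem.Str.isIn "[CONFLICT]" r then [((1 : Int), r)] else []) ++
  (if PySem.Str.isIn "[Radar]" r && !PySem.Str.isIn "[CONFLICT]" r then [((2 : Int), r)] else [])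

lemma pvTagged_eq (reasons : List String) :
    reasons.foldl (fun acc r =>
      if PySem.Str.isIn "[CONFLICT]" r then acc ++ [((0 : Int), r)]
      else
        let acc1 := if PySem.Str.isIn "[Safety]" r then acc ++ [((1 : Int), r)] else acc
        if PySem.Str.isIn "[Radar]" r then acc1 ++ [((2 : Int), r)] else acc1) [] =
    reasons.flatMap pvTagOne := by
  have hbody : (fun (acc : List (Int × String)) r =>
      if PySem.Str.isIn "[CONFLICT]" r then acc ++ [((0 : Int), r)]
      else
        let acc1 := if PySem.Str.isIn "[Safety]" r then acc ++ [((1 : Int), r)] else acc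
        if PySem.Str.isIn "[Radar]" r then acc1 ++ [((2 : Int), r)] else acc1) =
      (fun acc r => acc ++ pvTagOne r) := by
    funext acc r
    rcases Bool.eq_false_or_eq_true (PySem.Str.isIn "[CONFLICT]" r) with hc | hc <;>
      rcases Bool.eq_false_or_eq_true (PySem.Str.isIn "[Safety]" r) with hs | hs <;>
      rcases Bool.eq_false_or_eq_true (PySem.Str.isIn "[Radar]" r) with hr | hr <;>
      (simp only [pvTagOne, hc, hs, hr]; simp)
  rw [hbody, PySem.List.foldl_append_eq_flatMap]
  simp

lemma pvKeys_mem (reasons : List String) :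
    ∀ p ∈ reasons.flatMap pvTagOne, p.1 = 0 ∨ p.1 = 1 ∨ p.1 = 2 := by
  intro p hp
  rcases List.mem_flatMap.mp hp with ⟨r, _, hpr⟩
  unfold pvTagOne at hpr
  split_ifs at hpr <;> simp_all <;> (rcases hpr with h | h <;> simp [h])

lemma pvFilter0 (reasons : List String) :
    (reasons.flatMap pvTagOne).filter (fun t => t.1 == 0) =
    (reasons.filter (fun r => PySem.Str.isIn "[CONFLICT]" r)).map (fun r => ((0 : Int), r)) := by
  induction reasons with
  | nil => simp
  | cons r rs ih =>
    rcases Bool.eq_false_or_eq_true (PySem.Str.isIn "[CONFLICT]" r) with hc | hc <;>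
      rcases Bool.eq_false_or_eq_true (PySem.Str.isIn "[Safety]" r) with hs | hs <;>
      rcases Bool.eq_false_or_eq_true (PySem.Str.isIn "[Radar]" r) with hr | hr <;>
      (simp only [List.flatMap_cons, List.filter_append, List.filter_cons, pvTagOne, hc, hs, hr]; simp [ih])

lemma pvFilter1 (reasons : List String) :
    (reasons.flatMap pvTagOne).filter (fun t => t.1 == 1) =
    (reasons.filter (fun r => PySem.Str.isIn "[Safety]" r && !PySem.Str.isIn "[CONFLICT]" r)).map (fun r => ((1 : Int), r)) := by
  induction reasons with
  | nil => simp
  | cons r rs ih =>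
    rcases Bool.eq_false_or_eq_true (PySem.Str.isIn "[CONFLICT]" r) with hc | hc <;>
      rcases Bool.eq_false_or_eq_true (PySem.Str.isIn "[Safety]" r) with hs | hs <;>
      rcases Bool.eq_false_or_eq_true (PySem.Str.isIn "[Radar]" r) with hr | hr <;>
      (simp only [List.flatMap_cons, List.filter_append, List.filter_cons, pvTagOne, hc, hs, hr]; simp [ih])

lemma pvFilter2 (reasons : List String) :
    (reasons.flatMap pvTagOne).filter (fun t => t.1 == 2) =
    (reasons.filter (fun r => PySem.Str.isIn "[Radar]" r && !PySem.Str.isIn "[CONFLICT]" r)).map (fun r => ((2 : Int), r)) := by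
  induction reasons with
  | nil => simp
  | cons r rs ih =>
    rcases Bool.eq_false_or_eq_true (PySem.Str.isIn "[CONFLICT]" r) with hc | hc <;>
      rcases Bool.eq_false_or_eq_true (PySem.Str.isIn "[Safety]" r) with hs | hs <;>
      rcases Bool.eq_false_or_eq_true (PySem.Str.isIn "[Radar]" r) with hr | hr <;>
      (simp only [List.flatMap_cons, List.filter_append, List.filter_cons, pvTagOne, hc, hs, hr]; simp [ih])

lemma pvInsertBy_all_before {α : Type} (before : α → α → Bool) (x : α) (zs : List α)
    (h : ∀ y ∈ zs, before x y = true) :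
    PySem.List.insertBy before x zs = x :: zs := by
  cases zs with
  | nil => simp [PySem.List.insertBy]
  | cons y ys => simp [PySem.List.insertBy, h y (by simp)]

lemma pvInsertBy_append_of_not {α : Type} (before : α → α → Bool) (x : α) (ys zs : List α)
    (h : ∀ y ∈ ys, before x y = false) :
    PySem.List.insertBy before x (ys ++ zs) = ys ++ PySem.List.insertBy before x zs := by
  induction ys with
  | nil => simp
  | cons y ys ih =>
    have hy : before x y = false := h y (by simp)
    simp [PySem.List.insertBy, hy]
    exact ih (fun y hy => h y (by simp [hy]))

-- the stable-sort invariant: the three priority groups stay in first-seen order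
lemma pvFoldl_insert_group (l : List (Int × String)) :
    ∀ (a0 a1 a2 : List (Int × String)),
    (∀ p ∈ a0, p.1 = 0) → (∀ p ∈ a1, p.1 = 1) → (∀ p ∈ a2, p.1 = 2) →
    (∀ p ∈ l, p.1 = 0 ∨ p.1 = 1 ∨ p.1 = 2) →
    l.foldl (fun acc x => PySem.List.insertBy (fun a b => decide (a.1 < b.1)) x acc) (a0 ++ a1 ++ a2) =
      (a0 ++ l.filter (fun t => t.1 == 0)) ++ (a1 ++ l.filter (fun t => t.1 == 1)) ++
      (a2 ++ l.filter (fun t => t.1 == 2)) := by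
  induction l with
  | nil => intro a0 a1 a2 _ _ _ _; simp
  | cons x l ih =>
    intro a0 a1 a2 h0 h1 h2 hk
    have hkl : ∀ p ∈ l, p.1 = 0 ∨ p.1 = 1 ∨ p.1 = 2 := fun p hp => hk p (by simp [hp])
    rcases hk x (by simp) with hx | hx | hx
    · have step : PySem.List.insertBy (fun a b => decide (a.1 < b.1)) x (a0 ++ a1 ++ a2) =
          (a0 ++ [x]) ++ a1 ++ a2 := by
        rw [List.append_assoc, pvInsertBy_append_of_not _ x a0 (a1 ++ a2)
          (by intro y hy; simp [h0 y hy, hx])]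
        rw [pvInsertBy_all_before _ x (a1 ++ a2) (by
          intro y hy
          rcases List.mem_append.mp hy with hy | hy
          · simp [h1 y hy, hx]
          · simp [h2 y hy, hx])]
        simp
      simp only [List.foldl_cons, step]
      rw [ih (a0 ++ [x]) a1 a2
        (by intro p hp; rcases List.mem_append.mp hp with hp | hp
            · exact h0 p hp
            · simp at hp; simp [hp, hx]) h1 h2 hkl]
      simp [hx, List.append_assoc]
    · have step : PySem.List.insertBy (fun a b => decide (a.1 < b.1)) x (a0 ++ a1 ++ a2) =
          a0 ++ (a1 ++ [x]) ++ a2 := by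
        rw [List.append_assoc, pvInsertBy_append_of_not _ x a0 (a1 ++ a2)
          (by intro y hy; simp [h0 y hy, hx])]
        rw [pvInsertBy_append_of_not _ x a1 a2 (by intro y hy; simp [h1 y hy, hx])]
        rw [pvInsertBy_all_before _ x a2 (by intro y hy; simp [h2 y hy, hx])]
        simp
      simp only [List.foldl_cons, step]
      rw [ih a0 (a1 ++ [x]) a2 h0
        (by intro p hp; rcases List.mem_append.mp hp with hp | hp
            · exact h1 p hp
            · simp at hp; simp [hp, hx]) h2 hkl]
      simp [hx, List.append_assoc]
    · have step : PySem.List.insertBy (fun a b => decide (a.1 < b.1)) x (a0 ++ a1 ++ a2) =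
          a0 ++ a1 ++ (a2 ++ [x]) := by
        rw [PySem.List.insertBy_of_forall_not_before _ x (a0 ++ a1 ++ a2) (by
          intro y hy
          rcases List.mem_append.mp hy with hy' | hy'
          · rcases List.mem_append.mp hy' with h | h
            · simp [h0 y h, hx]
            · simp [h1 y h, hx]
          · simp [h2 y hy', hx])]
        simp
      simp only [List.foldl_cons, step]
      rw [ih a0 a1 (a2 ++ [x]) h0 h1
        (by intro p hp; rcases List.mem_append.mp hp with hp | hp
            · exact h2 p hp
            · simp at hp; simp [hp, hx]) hkl]
      simp [hx, List.append_assoc]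

lemma pvSorted_group (l : List (Int × String)) (h : ∀ p ∈ l, p.1 = 0 ∨ p.1 = 1 ∨ p.1 = 2) :
    PySem.List.sorted l (fun t => t.1) =
      l.filter (fun t => t.1 == 0) ++ l.filter (fun t => t.1 == 1) ++ l.filter (fun t => t.1 == 2) := by
  rw [PySem.List.sorted_eq_foldl_insertBy]
  have := pvFoldl_insert_group l [] [] [] (by simp) (by simp) (by simp) h
  simpa using this

-- B's prioritized list is exactly A's three filtered lists in order
lemma pvPrioritized_eq (reasons : List String) :
    (PySem.List.sorted (reasons.flatMap pvTagOne) (fun t => t.1)).map (fun t => t.2) =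
      reasons.filter (fun r => PySem.Str.isIn "[CONFLICT]" r) ++
      reasons.filter (fun r => PySem.Str.isIn "[Safety]" r && !PySem.Str.isIn "[CONFLICT]" r) ++
      reasons.filter (fun r => PySem.Str.isIn "[Radar]" r && !PySem.Str.isIn "[CONFLICT]" r) := by
  rw [pvSorted_group _ (pvKeys_mem reasons), pvFilter0, pvFilter1, pvFilter2]
  simp

-- ===== VERDICT (by name: the statement is the Claim_ definition above) =====
theorem build_compact_reason_summary_py_spec : Claim_equal_build_compact_reason_summary_py := by
  intro reasons max_reasons _
  unfold Spec_build_compact_reason_summary_py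
  by_cases h : reasons = []
  · simp [build_compact_reason_summary_py, build_compact_reason_summary_py_alt, h]
  · simp only [build_compact_reason_summary_py, build_compact_reason_summary_py_alt, if_neg h,
      pvTagged_eq, pvPrioritized_eq]
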